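-- pv_equiv track=rewrite | github.com/Chen-Cai-OSU/ER-staircode | util.py | get_left_epsilon
-- ===== SOURCE A (Python) =====
-- def get_left_epsilon(stair, sigma = -1):
--     """
--     :param stair: is a list of tupe of form (sigma, epsilon)
--     :return: from all left(smaller) epsion, get the the rightmost(largest)
--     """
--     assert type(stair) == list
--
--     if len(stair) == 0:
--         return None, -1
--     else: # todo can be improved
--         eps, sigs = [], []
--         for (sig, ep) in stair:
--             if sig < sigma:
--                 eps.append(ep)
--                 sigs.append(sig)
--         if len(eps) == 0: # all points are on the right
--             return None, -1
--         else:
--             return sigs[eps.index(min(eps))], min(eps)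
-- ===== SOURCE B (Python) =====
-- def get_left_epsilon(stair, sigma=-1):
--     """Single pass tracking the smallest epsilon (first occurrence on ties)
--     among tuples with sig < sigma; no intermediate lists."""
--     assert type(stair) == list
--     best_sig, best_eps = None, None
--     for sig, ep in stair:
--         if sig < sigma and (best_eps is None or ep < best_eps):
--             best_sig, best_eps = sig, ep
--     if best_eps is None:
--         return None, -1
--     return best_sig, best_eps
-- ===== Notes on version B (the rewrite author's own statement) =====
-- stated objective: simpler
-- what changed: Replaces A's three passes (build two parallel filtered lists, take min, then index-scan for the min's position) with one fold that tracks the best (sig, eps) pair directly, using strict < so the first minimal epsilon wins as in A.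
import Mathlib
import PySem

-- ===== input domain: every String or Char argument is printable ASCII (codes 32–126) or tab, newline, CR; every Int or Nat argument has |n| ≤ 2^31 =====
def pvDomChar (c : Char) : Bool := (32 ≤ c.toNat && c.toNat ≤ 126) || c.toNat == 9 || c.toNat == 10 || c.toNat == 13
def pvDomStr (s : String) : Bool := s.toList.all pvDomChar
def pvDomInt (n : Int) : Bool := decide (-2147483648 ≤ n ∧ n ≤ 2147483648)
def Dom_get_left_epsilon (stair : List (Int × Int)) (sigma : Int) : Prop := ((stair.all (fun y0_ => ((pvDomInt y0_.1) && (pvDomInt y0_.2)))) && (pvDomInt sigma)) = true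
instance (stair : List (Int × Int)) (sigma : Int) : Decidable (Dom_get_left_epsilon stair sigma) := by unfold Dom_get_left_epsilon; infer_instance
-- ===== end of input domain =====

-- B replaces A's three passes (filter into two lists, min, index) by one fold tracking the best pair: simpler, same O(n).

-- ===== PORT A =====
def get_left_epsilon (stair : List (Int × Int)) (sigma : Int) : Option Int × Int :=
  if stair.length = 0 then (none, -1)
  else
    -- the loop building eps and sigs
    let es := stair.foldl (fun (acc : List Int × List Int) p =>
      if p.1 < sigma then (acc.1 ++ [p.2], acc.2 ++ [p.1]) else acc) ([], [])
    if es.1.length = 0 then (none, -1)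
    else
      match PySem.List.min? es.1 (fun x => x) with
      | none => (none, -1)  -- unreachable: es.1 ≠ []
      | some m =>
        match PySem.List.index? es.1 m with
        | none => (none, -1)  -- unreachable: m ∈ es.1
        | some i => (some (PySem.List.pyGetD es.2 (i : Int) 0), m)

-- ===== PORT B =====
def glepsStep (sigma : Int) (b : Option (Int × Int)) (p : Int × Int) : Option (Int × Int) :=
  if p.1 < sigma then
    match b with
    | none => some p
    | some q => if p.2 < q.2 then some p else some q
  else b

def get_left_epsilon_alt (stair : List (Int × Int)) (sigma : Int) : Option Int × Int :=
  match stair.foldl (glepsStep sigma) none with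
  | none => (none, -1)
  | some (s, e) => (some s, e)

-- ===== PRECONDITION & SPEC =====
def Spec_get_left_epsilon (stair : List (Int × Int)) (sigma : Int) (out : Option Int × Int) : Prop := out = get_left_epsilon_alt stair sigma
instance (stair : List (Int × Int)) (sigma : Int) (out : Option Int × Int) : Decidable (Spec_get_left_epsilon stair sigma out) := by unfold Spec_get_left_epsilon; infer_instance

-- ===== CLAIM (what is proved, stated in full; the proofs are below) =====
def Claim_equal_get_left_epsilon : Prop := ∀ (stair : List (Int × Int)) (sigma : Int), Dom_get_left_epsilon stair sigma → Spec_get_left_epsilon stair sigma (get_left_epsilon stair sigma)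

-- ===== LEMMAS AND PROOFS =====

-- running best of B, over the already-filtered list
def glepsFm (q : Int × Int) : List (Int × Int) → Int × Int
  | [] => q
  | p :: t => glepsFm (if p.2 < q.2 then p else q) t

-- A's loop builds the two projections of the filtered list
theorem glepsFoldA (sigma : Int) : ∀ (stair : List (Int × Int)) (acc : List Int × List Int),
    stair.foldl (fun (acc : List Int × List Int) p =>
      if p.1 < sigma then (acc.1 ++ [p.2], acc.2 ++ [p.1]) else acc) acc =
    (acc.1 ++ (stair.filter (fun p => decide (p.1 < sigma))).map (·.2),
     acc.2 ++ (stair.filter (fun p => decide (p.1 < sigma))).map (·.1)) := by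
  intro stair
  induction stair with
  | nil => simp
  | cons p t ih =>
    intro acc
    by_cases hp : p.1 < sigma <;>
      simp [hp, List.foldl_cons, ih]

-- B's fold only moves on elements passing the test
theorem glepsFoldB_filter (sigma : Int) : ∀ (stair : List (Int × Int)) (b : Option (Int × Int)),
    stair.foldl (glepsStep sigma) b =
    (stair.filter (fun p => decide (p.1 < sigma))).foldl (glepsStep sigma) b := by
  intro stair
  induction stair with
  | nil => simp
  | cons p t ih =>
    intro b
    by_cases hp : p.1 < sigma
    · simp [hp, List.foldl_cons, ih]
    · simp [hp, List.foldl_cons, ih, glepsStep]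

theorem glepsFoldB_fm (sigma : Int) : ∀ (l : List (Int × Int)), (∀ p ∈ l, p.1 < sigma) →
    ∀ q : Int × Int, l.foldl (glepsStep sigma) (some q) = some (glepsFm q l) := by
  intro l
  induction l with
  | nil => intro _ q; simp [glepsFm]
  | cons p t ih =>
    intro hl q
    have hp : p.1 < sigma := hl p (by simp)
    have ht : ∀ x ∈ t, x.1 < sigma := fun x hx => hl x (by simp [hx])
    by_cases h2 : p.2 < q.2 <;>
      simp [List.foldl_cons, glepsStep, hp, glepsFm, h2, ih ht]

-- glepsFm q t is the first pair of q::t with minimal second component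
theorem glepsFm_spec : ∀ (t : List (Int × Int)) (q : Int × Int),
    ∃ pre suf, q :: t = pre ++ (glepsFm q t) :: suf ∧
      (∀ p ∈ pre, (glepsFm q t).2 < p.2) ∧ (∀ p ∈ q :: t, (glepsFm q t).2 ≤ p.2) := by
  intro t
  induction t with
  | nil =>
    intro q
    exact ⟨[], [], by simp [glepsFm], by simp, by simp [glepsFm]⟩
  | cons p t ih =>
    intro q
    by_cases hp : p.2 < q.2
    · obtain ⟨pre, suf, heq, hpre, hall⟩ := ih p
      have hr : glepsFm q (p :: t) = glepsFm p t := by simp [glepsFm, hp]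
      refine ⟨q :: pre, suf, ?_, ?_, ?_⟩
      · rw [hr]; simpa using congrArg (q :: ·) heq
      · intro x hx
        rcases List.mem_cons.mp hx with rfl | hx
        · exact lt_of_le_of_lt (hr ▸ hall p (by simp)) hp
        · exact hr ▸ hpre x hx
      · intro x hx
        rcases List.mem_cons.mp hx with rfl | hx
        · exact le_of_lt (lt_of_le_of_lt (hr ▸ hall p (by simp)) hp)
        · exact hr ▸ hall x hx
    · obtain ⟨pre, suf, heq, hpre, hall⟩ := ih q
      have hr : glepsFm q (p :: t) = glepsFm q t := by simp [glepsFm, hp]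
      cases pre with
      | nil =>
        have hq : glepsFm q t = q := by
          have := heq; simp at this; exact this.1.symm
        have hsuf : suf = t := by
          have := heq; simp at this; exact this.2.symm
        refine ⟨[], p :: t, by simp [hr, hq], by simp, ?_⟩
        intro x hx
        rcases List.mem_cons.mp hx with rfl | hx
        · simp [hr, hq]
        · rcases List.mem_cons.mp hx with rfl | hx
          · rw [hr, hq]; exact not_lt.mp hp
          · exact hr ▸ hall x (List.mem_cons_of_mem q hx)
      | cons a pre0 =>
        rw [List.cons_append, List.cons.injEq] at heq
        obtain ⟨rfl, ht⟩ := heq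
        have hqgt : (glepsFm q t).2 < q.2 := hpre q (by simp)
        refine ⟨q :: p :: pre0, suf, ?_, ?_, ?_⟩
        · rw [hr]; conv_lhs => rw [ht]
          simp
        · intro x hx
          rcases List.mem_cons.mp hx with rfl | hx
          · exact hr ▸ hqgt
          · rcases List.mem_cons.mp hx with rfl | hx
            · exact hr ▸ lt_of_lt_of_le hqgt (not_lt.mp hp)
            · exact hr ▸ hpre x (by simp [hx])
        · intro x hx
          rcases List.mem_cons.mp hx with rfl | hx
          · exact hr ▸ hall x (by simp)
          · rcases List.mem_cons.mp hx with rfl | hx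
            · exact hr ▸ le_of_lt (lt_of_lt_of_le hqgt (not_lt.mp hp))
            · exact hr ▸ hall x (by simp [hx])

-- ===== VERDICT (by name: the statement is the Claim_ definition above) =====
theorem get_left_epsilon_spec : Claim_equal_get_left_epsilon := by
  intro stair sigma _
  unfold Spec_get_left_epsilon get_left_epsilon get_left_epsilon_alt
  rw [glepsFoldA sigma stair ([], []), glepsFoldB_filter sigma stair none]
  cases stair with
  | nil => simp
  | cons s0 st =>
    simp only [List.length_cons, Nat.succ_ne_zero, if_false, List.nil_append]
    cases hlc : (s0 :: st).filter (fun p => decide (p.1 < sigma)) with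
    | nil => simp
    | cons q t =>
      have hmem : ∀ p ∈ q :: t, p.1 < sigma := by
        intro p hp
        have hp' : p ∈ List.filter (fun p => decide (p.1 < sigma)) (s0 :: st) := hlc ▸ hp
        exact of_decide_eq_true (List.mem_filter.mp hp').2
      obtain ⟨pre, suf, heq, hpre, hall⟩ := glepsFm_spec t q
      rcases hfm : glepsFm q t with ⟨r1, r2⟩
      rw [hfm] at heq hpre hall
      have hfold : (q :: t).foldl (glepsStep sigma) none = some (r1, r2) := by
        have hq : q.1 < sigma := hmem q (by simp)
        simp only [List.foldl_cons, glepsStep, if_pos hq]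
        rw [glepsFoldB_fm sigma t (fun x hx => hmem x (by simp [hx])) q, hfm]
      have heps : (q :: t).map (·.2) = pre.map (·.2) ++ r2 :: suf.map (·.2) := by
        rw [heq]; simp
      have hmin : PySem.List.min? ((q :: t).map (·.2)) (fun x => x) = some r2 := by
        cases hm : PySem.List.min? ((q :: t).map (·.2)) (fun x => x) with
        | none => simp [PySem.List.min?_eq_none_iff] at hm
        | some m =>
          have hmmem := PySem.List.min?_mem hm
          have hle := PySem.List.min?_isMin hm
          obtain ⟨p, hp, hpm⟩ := List.mem_map.mp hmmem
          have h1 : r2 ≤ m := hpm ▸ hall p (heq ▸ hp)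
          have h2 : m ≤ r2 := hle r2 (by rw [heq]; simp)
          rw [le_antisymm h2 h1]
      have hidx : PySem.List.index? ((q :: t).map (·.2)) r2 = some pre.length := by
        apply (PySem.List.index?_eq_some_iff _ _ _).mpr
        refine ⟨pre.map (·.2), suf.map (·.2), heps, by simp, ?_⟩
        intro hr
        obtain ⟨p, hp, hpr⟩ := List.mem_map.mp hr
        exact absurd (hpre p hp) (by rw [hpr]; exact lt_irrefl r2)
      have hget : PySem.List.pyGetD ((q :: t).map (·.1)) ((pre.length : Nat) : Int) 0 = r1 := by
        rw [PySem.List.pyGetD_natCast, heq]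
        simp [List.getD_eq_getElem?_getD]
      rw [hfold, hmin]
      simp only [hidx, hget]
      simp
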